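-- pv_equiv track=rewrite | github.com/garochee33/DSH | agents/skills/cognitive.py | summarize_context
-- ===== SOURCE A (Python) =====
-- def summarize_context(turns: list[str], max_chars: int = 2000) -> str:
--     """Truncate context to max_chars, keeping most recent turns."""
--     result, total = [], 0
--     for turn in reversed(turns):
--         if total + len(turn) > max_chars:
--             break
--         result.append(turn)
--         total += len(turn)
--     return "\n".join(reversed(result))
-- ===== SOURCE B (Python) =====
-- def summarize_context(turns: list[str], max_chars: int = 2000) -> str:
--     """Truncate context to max_chars, keeping most recent turns.
--
--     Builds the cumulative lengths of the last k turns for every k, then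
--     binary-searches that monotone table for the largest fitting suffix.
--     """
--     n = len(turns)
--     sums, s = [0], 0
--     for t in reversed(turns):
--         s += len(t)
--         sums.append(s)
--     # first j in [1, n] with sums[j] > max_chars (n + 1 if none)
--     lo, hi = 1, n + 1
--     while lo < hi:
--         mid = (lo + hi) // 2
--         if sums[mid] > max_chars:
--             hi = mid
--         else:
--             lo = mid + 1
--     k = lo - 1
--     return "\n".join(turns[n - k:])
-- ===== Notes on version B (the rewrite author's own statement) =====
-- stated objective: alternative
-- what changed: Replaces A's greedy reversed accumulate-and-break scan with building a cumulative suffix-length table once and binary-searching it (the table is monotone since lengths are non-negative) for the largest suffix of turns that fits in max_chars, then joining that suffix slice.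
import Mathlib
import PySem

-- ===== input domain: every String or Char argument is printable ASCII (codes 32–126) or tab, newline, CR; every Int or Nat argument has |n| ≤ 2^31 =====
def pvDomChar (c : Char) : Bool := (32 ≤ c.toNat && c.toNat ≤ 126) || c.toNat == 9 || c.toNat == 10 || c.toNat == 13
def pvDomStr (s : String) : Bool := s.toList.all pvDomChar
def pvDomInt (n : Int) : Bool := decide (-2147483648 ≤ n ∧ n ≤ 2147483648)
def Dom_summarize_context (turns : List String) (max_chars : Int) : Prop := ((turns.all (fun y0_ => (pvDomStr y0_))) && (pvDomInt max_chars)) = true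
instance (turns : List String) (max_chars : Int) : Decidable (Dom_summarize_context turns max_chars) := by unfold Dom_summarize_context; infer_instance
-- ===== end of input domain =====

-- B replaces A's greedy reversed accumulate-and-break scan by a cumulative suffix-length
-- table plus a binary search for the largest fitting suffix (alternative decomposition).


-- ===== PORT A =====
-- the for-loop over reversed(turns) with its break, building `result` in order
def pvALoop (max_chars : Int) (rev : List String) (total : Int) : List String :=
  match rev with
  | [] => []
  | t :: rest =>
      if total + PySem.Str.len t > max_chars then []
      else t :: pvALoop max_chars rest (total + PySem.Str.len t)

def summarize_context (turns : List String) (max_chars : Int) : String :=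
  PySem.Str.join "\n" (pvALoop max_chars turns.reverse 0).reverse

-- ===== PORT B =====
-- `sums`/`s` loop of Source B: pair state (sums list so far, running total)
def pvBSums (turns : List String) : List Int :=
  (turns.reverse.foldl
    (fun (ps : List Int × Int) t => (ps.1 ++ [ps.2 + PySem.Str.len t], ps.2 + PySem.Str.len t))
    ([0], 0)).1

-- Source B's while-loop binary search: first j in [lo, hi) with sums[j] > max_chars (hi if none)
def pvBSearch (sums : List Int) (max_chars : Int) (lo hi : Nat) : Nat :=
  if _h : lo < hi then
    if sums.getD ((lo + hi) / 2) 0 > max_chars then pvBSearch sums max_chars lo ((lo + hi) / 2)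
    else pvBSearch sums max_chars ((lo + hi) / 2 + 1) hi
  else lo
termination_by hi - lo
decreasing_by all_goals omega

def summarize_context_alt (turns : List String) (max_chars : Int) : String :=
  let n := turns.length
  let sums := pvBSums turns
  let lo := pvBSearch sums max_chars 1 (n + 1)
  let k := lo - 1
  PySem.Str.join "\n" (PySem.List.slice turns (some ((n : Int) - (k : Int))) none)

-- ===== PRECONDITION & SPEC =====
def Spec_summarize_context (turns : List String) (max_chars : Int) (out : String) : Prop := out = summarize_context_alt turns max_chars
instance (turns : List String) (max_chars : Int) (out : String) : Decidable (Spec_summarize_context turns max_chars out) := by unfold Spec_summarize_context; infer_instance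

-- ===== CLAIM (what is proved, stated in full; the proofs are below) =====
def Claim_equal_summarize_context : Prop := ∀ (turns : List String) (max_chars : Int), Dom_summarize_context turns max_chars → Spec_summarize_context turns max_chars (summarize_context turns max_chars)

-- ===== LEMMAS AND PROOFS =====

-- partial sums of lengths of the first j strings
def pvS (rev : List String) (j : Nat) : Int := ((rev.take j).map PySem.Str.len).sum

lemma pvS_zero (rev : List String) : pvS rev 0 = 0 := rfl

lemma pvS_cons_succ (t : String) (r : List String) (j : Nat) :
    pvS (t :: r) (j + 1) = PySem.Str.len t + pvS r j := by
  simp [pvS, List.take_succ_cons]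

lemma pvLen_nonneg (t : String) : (0:Int) ≤ PySem.Str.len t := by
  rw [PySem.Str.len_eq]; exact_mod_cast Nat.zero_le _

lemma pvS_nonneg (rev : List String) (k : Nat) : (0:Int) ≤ pvS rev k := by
  induction rev generalizing k with
  | nil => simp [pvS]
  | cons t r ih =>
      cases k with
      | zero => simp [pvS]
      | succ k =>
          rw [pvS_cons_succ]
          have := pvLen_nonneg t
          have := ih k
          omega

lemma pvS_mono (rev : List String) {i j : Nat} (h : i ≤ j) : pvS rev i ≤ pvS rev j := by
  induction rev generalizing i j with
  | nil => simp [pvS]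
  | cons t r ih =>
      cases i with
      | zero =>
          cases j with
          | zero => exact le_refl _
          | succ j =>
              rw [pvS_zero, pvS_cons_succ]
              have := pvLen_nonneg t
              have := pvS_nonneg r j
              omega
      | succ i =>
          cases j with
          | zero => omega
          | succ j =>
              rw [pvS_cons_succ, pvS_cons_succ]
              have := ih (by omega : i ≤ j)
              omega

-- greedy loop = take of its own length
lemma pvALoop_eq_take (max_chars : Int) (rev : List String) (total : Int) :
    pvALoop max_chars rev total = rev.take (pvALoop max_chars rev total).length := by
  induction rev generalizing total with
  | nil => simp [pvALoop]
  | cons t r ih =>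
      by_cases h : total + PySem.Str.len t > max_chars
      · simp only [pvALoop, if_pos h, List.length_nil, List.take_zero]
      · simp only [pvALoop, if_neg h, List.length_cons, List.take_succ_cons]
        rw [← ih]

lemma pvALoop_len_le (max_chars : Int) (rev : List String) (total : Int) :
    (pvALoop max_chars rev total).length ≤ rev.length := by
  induction rev generalizing total with
  | nil => simp [pvALoop]
  | cons t r ih =>
      by_cases h : total + PySem.Str.len t > max_chars
      · simp only [pvALoop, if_pos h, List.length_nil]; omega
      · simp only [pvALoop, if_neg h, List.length_cons]
        exact Nat.succ_le_succ (ih _)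

-- greedy characterisation (i): every nonempty taken prefix fits
lemma pvALoop_fits (max_chars : Int) (rev : List String) (total : Int) :
    ∀ j, 1 ≤ j → j ≤ (pvALoop max_chars rev total).length → total + pvS rev j ≤ max_chars := by
  induction rev generalizing total with
  | nil => intro j h1 h2; simp [pvALoop] at h2; omega
  | cons t r ih =>
      intro j h1 h2
      by_cases h : total + PySem.Str.len t > max_chars
      · simp only [pvALoop, if_pos h, List.length_nil] at h2; omega
      · simp only [pvALoop, if_neg h, List.length_cons] at h2
        cases j with
        | zero => omega
        | succ j =>
            rw [pvS_cons_succ]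
            cases Nat.eq_zero_or_pos j with
            | inl hz => subst hz; simpa [pvS_zero] using (by omega : total + PySem.Str.len t ≤ max_chars)
            | inr hp =>
                have := ih (total + PySem.Str.len t) j hp (by omega)
                omega

-- greedy characterisation (ii): the next turn (if any) would overflow
lemma pvALoop_stop (max_chars : Int) (rev : List String) (total : Int) :
    (pvALoop max_chars rev total).length = rev.length ∨
      total + pvS rev ((pvALoop max_chars rev total).length + 1) > max_chars := by
  induction rev generalizing total with
  | nil => left; simp [pvALoop]
  | cons t r ih =>
      by_cases h : total + PySem.Str.len t > max_chars
      · right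
        simp only [pvALoop, if_pos h, List.length_nil, Nat.zero_add]
        rw [pvS_cons_succ, pvS_zero]
        omega
      · simp only [pvALoop, if_neg h, List.length_cons]
        rcases ih (total + PySem.Str.len t) with hl | hr
        · left; omega
        · right; rw [pvS_cons_succ]; omega

-- the sums fold produces exactly the partial-sum table
lemma pvBSums_fold (rev : List String) (acc : List Int) (s : Int) :
    (rev.foldl
      (fun (ps : List Int × Int) t => (ps.1 ++ [ps.2 + PySem.Str.len t], ps.2 + PySem.Str.len t))
      (acc, s)) =
    (acc ++ (List.range rev.length).map (fun j => s + pvS rev (j + 1)), s + pvS rev rev.length) := by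
  induction rev generalizing acc s with
  | nil => simp [pvS]
  | cons t r ih =>
      simp only [List.foldl_cons, ih, List.length_cons, Prod.mk.injEq]
      have hmap : List.map (fun j => s + pvS (t :: r) (j + 1)) (List.range (r.length + 1))
          = (s + PySem.Str.len t) ::
            List.map (fun j => s + PySem.Str.len t + pvS r (j + 1)) (List.range r.length) := by
        rw [List.range_succ_eq_map, List.map_cons, List.map_map]
        congr 1
        apply List.map_congr_left
        intro j _
        show s + pvS (t :: r) (j + 1 + 1) = s + PySem.Str.len t + pvS r (j + 1)
        rw [pvS_cons_succ]
        ring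
      rw [hmap, pvS_cons_succ]
      constructor
      · rw [List.append_assoc, List.singleton_append]
      · ring

lemma pvBSums_getD (turns : List String) (j : Nat) (hj : j ≤ turns.length) :
    (pvBSums turns).getD j 0 = pvS turns.reverse j := by
  unfold pvBSums
  rw [pvBSums_fold]
  cases j with
  | zero => simp [pvS_zero]
  | succ j =>
      simp only [List.getD]
      rw [List.getElem?_append_right (by simp)]
      simp only [List.length_cons, List.length_nil, List.getElem?_map]
      rw [List.getElem?_range (by simpa using (by omega : j < turns.length))]
      simp

-- binary-search characterisation (needs monotone table)
lemma pvBSearch_char (sums : List Int) (m : Int) :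
    ∀ (d lo hi : Nat), hi - lo = d → lo ≤ hi →
    (∀ i j, i ≤ j → j < hi → sums.getD i 0 ≤ sums.getD j 0) →
    lo ≤ pvBSearch sums m lo hi ∧ pvBSearch sums m lo hi ≤ hi ∧
      (∀ j, lo ≤ j → j < pvBSearch sums m lo hi → sums.getD j 0 ≤ m) ∧
      (pvBSearch sums m lo hi < hi → sums.getD (pvBSearch sums m lo hi) 0 > m) := by
  intro d
  induction d using Nat.strong_induction_on with
  | _ d ih =>
      intro lo hi hd hle hmono
      by_cases h : lo < hi
      · by_cases hgt : sums.getD ((lo + hi) / 2) 0 > m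
        · have heq : pvBSearch sums m lo hi = pvBSearch sums m lo ((lo + hi) / 2) := by
            rw [pvBSearch, dif_pos h, if_pos hgt]
          obtain ⟨h1, h2, h3, h4⟩ := ih ((lo + hi) / 2 - lo) (by omega) lo ((lo + hi) / 2) rfl
            (by omega) (fun i j hij hj => hmono i j hij (by omega))
          rw [heq]
          refine ⟨h1, by omega, h3, ?_⟩
          intro hr
          by_cases hrm : pvBSearch sums m lo ((lo + hi) / 2) < (lo + hi) / 2
          · exact h4 hrm
          · have hre : pvBSearch sums m lo ((lo + hi) / 2) = (lo + hi) / 2 := by omega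
            rw [hre]; exact hgt
        · have heq : pvBSearch sums m lo hi = pvBSearch sums m ((lo + hi) / 2 + 1) hi := by
            rw [pvBSearch, dif_pos h, if_neg hgt]
          obtain ⟨h1, h2, h3, h4⟩ := ih (hi - ((lo + hi) / 2 + 1)) (by omega) ((lo + hi) / 2 + 1)
            hi rfl (by omega) hmono
          rw [heq]
          refine ⟨by omega, h2, ?_, h4⟩
          intro j hj hjr
          by_cases hjm : j ≤ (lo + hi) / 2
          · have := hmono j ((lo + hi) / 2) hjm (by omega)
            omega
          · exact h3 j (by omega) hjr
      · rw [pvBSearch, dif_neg h]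
        exact ⟨le_refl _, by omega, fun j hj hjr => by omega, fun hr => by omega⟩

-- (turns.reverse.take c).reverse = turns.drop (n - c)
lemma take_reverse_reverse (turns : List String) (c : Nat) (_hc : c ≤ turns.length) :
    (turns.reverse.take c).reverse = turns.drop (turns.length - c) := by
  rw [List.take_reverse]
  simp

theorem summarize_context_spec_aux (turns : List String) (max_chars : Int) :
    summarize_context turns max_chars = summarize_context_alt turns max_chars := by
  unfold summarize_context summarize_context_alt
  set n := turns.length with hn
  set rev := turns.reverse with hrev
  set cA := (pvALoop max_chars rev 0).length with hcA
  have hcAle : cA ≤ n := by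
    have := pvALoop_len_le max_chars rev 0
    simpa [hrev] using this
  -- binary search characterisation
  have hmono : ∀ i j, i ≤ j → j < n + 1 → (pvBSums turns).getD i 0 ≤ (pvBSums turns).getD j 0 := by
    intro i j hij hj
    rw [pvBSums_getD turns i (by omega), pvBSums_getD turns j (by omega)]
    exact pvS_mono _ hij
  obtain ⟨h1, h2, h3, h4⟩ := pvBSearch_char (pvBSums turns) max_chars (n + 1 - 1) 1 (n + 1) rfl (by omega) hmono
  set lo := pvBSearch (pvBSums turns) max_chars 1 (n + 1) with hlo
  set cB := lo - 1 with hcB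
  have hcBle : cB ≤ n := by omega
  -- cA = cB
  have hceq : cA = cB := by
    by_contra hne
    rcases Nat.lt_or_ge cA cB with hlt | hge
    · -- cA < cB ≤ n, so greedy stopped early: pvS rev (cA+1) > max; but cA+1 < lo gives ≤
      rcases pvALoop_stop max_chars rev 0 with hstop | hstop
      · have hAn : cA = n := by
          rw [hcA, hstop, hrev, List.length_reverse]
        omega
      · rw [← hcA] at hstop
        have hle' : (pvBSums turns).getD (cA + 1) 0 ≤ max_chars :=
          h3 (cA + 1) (by omega) (by omega)
        rw [pvBSums_getD turns (cA + 1) (by omega)] at hle'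
        rw [← hrev] at hle'
        omega
    · have hlt : cB < cA := by omega
      -- lo = cB+1 ≤ cA ≤ n < n+1, so sums[lo] > max; but greedy fits up to cA
      have hfit := pvALoop_fits max_chars rev 0 lo (by omega) (by rw [← hcA]; omega)
      have hgt : (pvBSums turns).getD lo 0 > max_chars := h4 (by omega)
      rw [pvBSums_getD turns lo (by omega), ← hrev] at hgt
      omega
  -- list equality
  have hlst : (pvALoop max_chars rev 0).reverse =
      PySem.List.slice turns (some ((n : Int) - (cB : Int))) none := by
    have hslice : PySem.List.slice turns (some ((n : Int) - (cB : Int))) none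
        = turns.drop (n - cB) := by
      have : ((n : Int) - (cB : Int)) = ((n - cB : Nat) : Int) := by omega
      rw [this, PySem.List.slice_from_natCast]
    rw [hslice, ← hceq]
    rw [pvALoop_eq_take max_chars rev 0, ← hcA]
    exact take_reverse_reverse turns cA hcAle
  rw [hlst]

-- ===== VERDICT (by name: the statement is the Claim_ definition above) =====
theorem summarize_context_spec : Claim_equal_summarize_context := by
  intro turns max_chars _
  unfold Spec_summarize_context
  exact summarize_context_spec_aux turns max_chars
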